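-- pv_equiv track=rewrite | github.com/580132/rclone-backup-web | services/rclone_service.py | _remove_config_section
-- ===== SOURCE A (Python) =====
-- def _remove_config_section(config_content: str, section_name: str) -> str:
--     """从配置内容中删除指定的配置段"""
--     lines = config_content.split('\n')
--     result_lines = []
--     in_target_section = False
--
--     for line in lines:
--         line = line.strip()
--
--         # 检查是否是配置段开始
--         if line.startswith('[') and line.endswith(']'):
--             section = line[1:-1]
--             if section == section_name:
--                 in_target_section = True
--                 continue  # 跳过这一行
--             else:
--                 in_target_section = False
--
--         # 如果不在目标段中，保留这一行
--         if not in_target_section: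
--             result_lines.append(line)
--
--     return '\n'.join(result_lines).strip()
-- ===== SOURCE B (Python) =====
-- def _is_header(line):
--     return line.startswith('[') and line.endswith(']')
--
-- def _drops(block, section_name):
--     return bool(block) and _is_header(block[0]) and block[0][1:-1] == section_name
--
-- def _remove_config_section(config_content: str, section_name: str) -> str:
--     lines = [l.strip() for l in config_content.split('\n')]
--     blocks = []
--     current = []
--     for l in lines:
--         if _is_header(l):
--             blocks.append(current)
--             current = [l]
--         else:
--             current = current + [l]
--     blocks.append(current)
--     kept = [l for b in blocks if not _drops(b, section_name) for l in b]
--     return '\n'.join(kept).strip()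
-- ===== Notes on version B (the rewrite author's own statement) =====
-- stated objective: alternative
-- what changed: Replaced A's single streaming state-machine pass (an in_target_section flag updated line by line) with a build-then-filter structure: strip all lines, partition them into a preamble plus header-led blocks, drop every block whose header name matches, and concatenate the survivors.
import Mathlib
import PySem

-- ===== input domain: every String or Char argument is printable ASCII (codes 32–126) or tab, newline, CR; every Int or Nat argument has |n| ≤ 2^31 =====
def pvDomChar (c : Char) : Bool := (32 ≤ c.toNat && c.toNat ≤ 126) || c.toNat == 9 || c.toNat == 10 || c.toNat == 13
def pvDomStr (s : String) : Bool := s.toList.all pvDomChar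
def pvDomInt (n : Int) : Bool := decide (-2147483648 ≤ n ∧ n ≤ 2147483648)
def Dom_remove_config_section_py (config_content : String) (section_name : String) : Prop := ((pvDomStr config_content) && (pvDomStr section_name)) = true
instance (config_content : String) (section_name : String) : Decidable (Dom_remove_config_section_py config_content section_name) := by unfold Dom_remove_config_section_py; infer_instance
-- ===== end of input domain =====

-- B replaces A's streaming in_target_section state machine by a partition-into-blocks-then-filter decomposition (same cost, different structure).

-- ===== PORT A =====
-- literal transliteration of A's for-loop: state = (emitted lines, in_target_section flag)
def pvALoop (section_name : String) : List String → Bool → List String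
  | [], _ => []
  | line :: rest, in_target =>
    let l := PySem.Str.strip line
    if PySem.Str.startswith l "[" && PySem.Str.endswith l "]" then
      let sec := PySem.Str.slice l (some 1) (some (-1))
      if sec == section_name then
        pvALoop section_name rest true          -- continue, in_target_section = True
      else
        l :: pvALoop section_name rest false    -- in_target_section = False, then appended
    else if !in_target then
      l :: pvALoop section_name rest in_target
    else
      pvALoop section_name rest in_target

def remove_config_section_py (config_content : String) (section_name : String) : String :=
  let lines := (PySem.Str.split? config_content "\n").getD []
  PySem.Str.strip (PySem.Str.join "\n" (pvALoop section_name lines false))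

-- ===== PORT B =====
def pvIsHeader (line : String) : Bool :=
  PySem.Str.startswith line "[" && PySem.Str.endswith line "]"

def pvDrops (block : List String) (section_name : String) : Bool :=
  match block with
  | [] => false
  | h :: _ => pvIsHeader h && PySem.Str.slice h (some 1) (some (-1)) == section_name

-- the for-loop building blocks/current; base case is the final blocks.append(current)
def pvGroup : List String → List String → List (List String)
  | [], current => [current]
  | l :: rest, current =>
    if pvIsHeader l then current :: pvGroup rest [l]
    else pvGroup rest (current ++ [l])

def remove_config_section_py_alt (config_content : String) (section_name : String) : String :=
  let lines := ((PySem.Str.split? config_content "\n").getD []).map PySem.Str.strip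
  let blocks := pvGroup lines []
  let kept := ((blocks.filter (fun b => !pvDrops b section_name)).flatten)
  PySem.Str.strip (PySem.Str.join "\n" kept)

-- ===== PRECONDITION & SPEC =====
def Spec_remove_config_section_py (config_content : String) (section_name : String) (out : String) : Prop := out = remove_config_section_py_alt config_content section_name
instance (config_content : String) (section_name : String) (out : String) : Decidable (Spec_remove_config_section_py config_content section_name out) := by unfold Spec_remove_config_section_py; infer_instance

-- ===== CLAIM (what is proved, stated in full; the proofs are below) =====
def Claim_equal_remove_config_section_py : Prop := ∀ (config_content : String) (section_name : String), Dom_remove_config_section_py config_content section_name → Spec_remove_config_section_py config_content section_name (remove_config_section_py config_content section_name)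

-- ===== LEMMAS AND PROOFS =====

theorem pvDrops_append (l : String) (sn : String) (current : List String)
    (h : pvIsHeader l = false) : pvDrops (current ++ [l]) sn = pvDrops current sn := by
  cases current <;> simp [pvDrops, h]

-- the block decomposition of B computes exactly A's streaming pass, for any pending block
theorem pvKey (sn : String) : ∀ (ls current : List String),
    ((pvGroup (ls.map PySem.Str.strip) current).filter (fun b => !pvDrops b sn)).flatten
      = (if pvDrops current sn then [] else current) ++ pvALoop sn ls (pvDrops current sn)
  | [], current => by cases h : pvDrops current sn <;> simp [pvGroup, pvALoop, List.filter, h]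
  | l :: rest, current => by
    by_cases hh : pvIsHeader (PySem.Str.strip l) = true
    · have hhB : (PySem.Str.startswith (PySem.Str.strip l) "[" &&
          PySem.Str.endswith (PySem.Str.strip l) "]") = true := hh
      have hcs := hh
      simp only [pvIsHeader, Bool.and_eq_true] at hcs
      obtain ⟨hc1, hc2⟩ := hcs
      simp at hc1 hc2
      by_cases hm : (PySem.Str.slice (PySem.Str.strip l) (some 1) (some (-1)) == sn) = true
      · have hmE : PySem.Str.slice (PySem.Str.strip l) (some 1) (some (-1)) = sn := by
          simpa using hm
        have ih := pvKey sn rest [PySem.Str.strip l]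
        have hd : pvDrops [PySem.Str.strip l] sn = true := by simp [pvDrops, hh, hm]
        rw [hd] at ih
        simp only [if_true, List.nil_append] at ih
        cases h : pvDrops current sn <;>
          simp [pvGroup, pvALoop, hh, hmE, hc1, hc2, h, ih]
      · have hm' : (PySem.Str.slice (PySem.Str.strip l) (some 1) (some (-1)) == sn) = false := by
          simpa using hm
        have hmE : ¬ (PySem.Str.slice (PySem.Str.strip l) (some 1) (some (-1)) = sn) := by
          simpa using hm'
        have ih := pvKey sn rest [PySem.Str.strip l]
        have hd : pvDrops [PySem.Str.strip l] sn = false := by simp [pvDrops, hh, hm']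
        rw [hd] at ih
        simp only [Bool.false_eq_true, if_false] at ih
        cases h : pvDrops current sn <;>
          simp [pvGroup, pvALoop, hh, hm', hc1, hc2, h, ih]
    · have hh' : pvIsHeader (PySem.Str.strip l) = false := by simpa using hh
      have hhB : (PySem.Str.startswith (PySem.Str.strip l) "[" &&
          PySem.Str.endswith (PySem.Str.strip l) "]") = false := hh'
      have hcs := hh'
      simp [pvIsHeader] at hcs
      have ih := pvKey sn rest (current ++ [PySem.Str.strip l])
      rw [pvDrops_append _ _ _ hh'] at ih
      cases h : pvDrops current sn <;>
        simp [pvGroup, pvALoop, hh', h, ih] <;>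
        try (intro h1 h2; simp [hcs h1] at h2)

-- ===== VERDICT (by name: the statement is the Claim_ definition above) =====
theorem remove_config_section_py_spec : Claim_equal_remove_config_section_py := by
  intro c sn _
  unfold Spec_remove_config_section_py remove_config_section_py remove_config_section_py_alt
  show PySem.Str.strip (PySem.Str.join "\n" (pvALoop sn ((PySem.Str.split? c "\n").getD []) false))
      = PySem.Str.strip (PySem.Str.join "\n"
          (((pvGroup (((PySem.Str.split? c "\n").getD []).map PySem.Str.strip) []).filter
              (fun b => !pvDrops b sn)).flatten))
  have h0 : pvDrops [] sn = false := rfl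
  have h := pvKey sn ((PySem.Str.split? c "\n").getD []) []
  rw [h0] at h
  simp only [Bool.false_eq_true, if_false, List.nil_append] at h
  rw [h]
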